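-- pv_equiv track=rewrite | github.com/eventum-generator/eventum | tests/reporting/html.py | _parse_event_test
-- ===== SOURCE A (Python) =====
-- def _parse_event_test(name: str) -> tuple[str, str] | None:
--     """Parse ``test_template_minimal`` -> ``('Template', 'minimal')``."""
--     prefixes = ('template', 'script', 'replay')
--     stripped = name.removeprefix('test_')
--     for pfx in prefixes:
--         if stripped.startswith(pfx + '_'):
--             variant = stripped[len(pfx) + 1 :]
--             return pfx.title(), variant
--     return None
-- ===== SOURCE B (Python) =====
-- def _chain(word, title):
--     """Linear trie chain spelling ``word`` and ending in a terminal titled node."""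
--     node = {None: title}
--     for ch in reversed(word):
--         node = {ch: node}
--     return node
--
-- _TRIE = {**_chain('template_', 'Template'),
--          **_chain('script_', 'Script'),
--          **_chain('replay_', 'Replay')}
--
-- def _walk(node, s):
--     title = node.get(None)
--     if title is not None:
--         return title, s
--     if not s:
--         return None
--     child = node.get(s[0])
--     if child is None:
--         return None
--     return _walk(child, s[1:])
--
-- def _parse_event_test(name: str) -> tuple[str, str] | None:
--     """Parse ``test_template_minimal`` -> ``('Template', 'minimal')``."""
--     return _walk(_TRIE, name.removeprefix('test_'))
-- ===== Notes on version B (the rewrite author's own statement) =====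
-- stated objective: alternative
-- what changed: Replaces the loop of per-prefix startswith/slice checks with a character trie of the three prefixes built once, walked by a single recursive character-by-character scan of the stripped name.
import Mathlib
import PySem

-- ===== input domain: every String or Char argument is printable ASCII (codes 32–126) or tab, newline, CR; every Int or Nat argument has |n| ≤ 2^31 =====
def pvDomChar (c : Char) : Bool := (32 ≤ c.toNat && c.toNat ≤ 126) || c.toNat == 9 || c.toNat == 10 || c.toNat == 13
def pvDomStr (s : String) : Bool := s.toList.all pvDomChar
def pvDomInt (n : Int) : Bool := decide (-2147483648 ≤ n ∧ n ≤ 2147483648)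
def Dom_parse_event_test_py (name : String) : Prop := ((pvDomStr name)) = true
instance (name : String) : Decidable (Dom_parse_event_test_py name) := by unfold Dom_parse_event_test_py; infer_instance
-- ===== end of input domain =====

-- B replaces A's loop of per-prefix startswith/slice checks with a character trie
-- of the three prefixes, built once and walked by one recursive scan (objective: alternative).

-- shared primitives (no PySem equivalent): str.removeprefix and str.title,
-- ported by hand; title upper-cases a char after a non-alphabetic character and
-- lower-cases it otherwise — exact on the ASCII domain
def pyTitleGo (prevAlpha : Bool) : List Char → List Char
  | [] => []
  | c :: cs =>
    (if PySem.Chars.isalpha c then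
        (if prevAlpha then PySem.Chars.lowerChar c else PySem.Chars.upperChar c)
      else c) :: pyTitleGo (PySem.Chars.isalpha c) cs

def pyTitle (s : String) : String := String.ofList (pyTitleGo false s.toList)

def pyRemoveprefix (s p : String) : String :=
  if PySem.Str.startswith s p then String.ofList (s.toList.drop p.toList.length) else s

-- ===== PORT A =====
-- the for-loop over the prefix tuple, head branch first
def parseLoopA (prefixes : List String) (stripped : String) : Option (String × String) :=
  match prefixes with
  | [] => none
  | pfx :: rest =>
    if PySem.Str.startswith stripped (pfx ++ "_") then
      some (pyTitle pfx,
            String.ofList (PySem.List.slice stripped.toList (some ((pfx.toList.length : Int) + 1)) none))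
    else parseLoopA rest stripped

def parse_event_test_py (name : String) : Option (String × String) :=
  parseLoopA ["template", "script", "replay"] (pyRemoveprefix name "test_")

-- ===== PORT B =====
-- the trie: Python's nested dicts (optional None-keyed title + char-keyed children)
-- become a mutual inductive pair; dict lookup node.get(ch) = first-match on the child list
mutual
inductive Trie where
  | node (title : Option String) (children : TrieChildren) : Trie
inductive TrieChildren where
  | nil : TrieChildren
  | cons (c : Char) (t : Trie) (rest : TrieChildren) : TrieChildren
end

def childGet : TrieChildren → Char → Option Trie
  | .nil, _ => none
  | .cons c t rest, d => if c == d then some t else childGet rest d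

-- _chain: node = {None: title}; for ch in reversed(word): node = {ch: node}
def chain : List Char → String → Trie
  | [], title => .node (some title) .nil
  | c :: w, title => .node none (.cons c (chain w title) .nil)

def childrenOf : Trie → TrieChildren
  | .node _ ch => ch

-- the {**a, **b} merge of the chains' (disjoint-keyed) root dicts
def appendChildren : TrieChildren → TrieChildren → TrieChildren
  | .nil, ys => ys
  | .cons c t rest, ys => .cons c t (appendChildren rest ys)

def theTrie : Trie :=
  .node none (appendChildren (childrenOf (chain "template_".toList "Template"))
    (appendChildren (childrenOf (chain "script_".toList "Script"))
      (childrenOf (chain "replay_".toList "Replay"))))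

-- _walk, recursing on the string's characters (ported over List Char; exact)
def walk : Trie → List Char → Option (String × String)
  | .node (some ti) _, s => some (ti, String.ofList s)
  | .node none _, [] => none
  | .node none ch, c :: rest =>
    match childGet ch c with
    | none => none
    | some t' => walk t' rest
termination_by _ s => s.length

def parse_event_test_py_alt (name : String) : Option (String × String) :=
  walk theTrie (pyRemoveprefix name "test_").toList

-- ===== PRECONDITION & SPEC =====
def Spec_parse_event_test_py (name : String) (out : Option (String × String)) : Prop := out = parse_event_test_py_alt name
instance (name : String) (out : Option (String × String)) : Decidable (Spec_parse_event_test_py name out) := by unfold Spec_parse_event_test_py; infer_instance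

-- ===== CLAIM (what is proved, stated in full; the proofs are below) =====
def Claim_equal_parse_event_test_py : Prop := ∀ (name : String), Dom_parse_event_test_py name → Spec_parse_event_test_py name (parse_event_test_py name)

-- ===== LEMMAS AND PROOFS =====

-- the if-chain both programs compute, used only by the proofs
def spec3 (l : List Char) : Option (String × String) :=
  if "template_".toList <+: l then some ("Template", String.ofList (l.drop 9))
  else if "script_".toList <+: l then some ("Script", String.ofList (l.drop 7))
  else if "replay_".toList <+: l then some ("Replay", String.ofList (l.drop 7))
  else none

lemma startswith_decide (s p : List Char) :
    PySem.Chars.startswith s p = decide (p <+: s) := by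
  by_cases h : p <+: s
  · simp [h, (PySem.Chars.startswith_iff _ _).mpr h]
  · rw [decide_eq_false h]
    cases hb : PySem.Chars.startswith s p with
    | false => rfl
    | true => exact absurd ((PySem.Chars.startswith_iff _ _).mp hb) h

lemma loopA_eq_spec3 (stripped : String) :
    parseLoopA ["template", "script", "replay"] stripped = spec3 stripped.toList := by
  have e1 : PySem.Chars.startswith stripped.toList ("template".toList ++ "_".toList)
      = decide ("template_".toList <+: stripped.toList) := by
    rw [show "template".toList ++ "_".toList = "template_".toList from by decide]
    exact startswith_decide _ _
  have e2 : PySem.Chars.startswith stripped.toList ("script".toList ++ "_".toList)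
      = decide ("script_".toList <+: stripped.toList) := by
    rw [show "script".toList ++ "_".toList = "script_".toList from by decide]
    exact startswith_decide _ _
  have e3 : PySem.Chars.startswith stripped.toList ("replay".toList ++ "_".toList)
      = decide ("replay_".toList <+: stripped.toList) := by
    rw [show "replay".toList ++ "_".toList = "replay_".toList from by decide]
    exact startswith_decide _ _
  simp only [parseLoopA, PySem.Str.startswith, String.toList_append, spec3]
  rw [e1, e2, e3]
  simp only [decide_eq_true_eq]
  split_ifs with h1 h2 h3
  · rw [show (("template".toList.length : Int) + 1) = ((9 : Nat) : Int) from by decide,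
      PySem.List.slice_from_natCast,
      show pyTitle "template" = "Template" from by decide]
  · rw [show (("script".toList.length : Int) + 1) = ((7 : Nat) : Int) from by decide,
      PySem.List.slice_from_natCast,
      show pyTitle "script" = "Script" from by decide]
  · rw [show (("replay".toList.length : Int) + 1) = ((7 : Nat) : Int) from by decide,
      PySem.List.slice_from_natCast,
      show pyTitle "replay" = "Replay" from by decide]
  · rfl

lemma walk_chain (ti : String) (w : List Char) : ∀ (s : List Char),
    walk (chain w ti) s
      = if w <+: s then some (ti, String.ofList (s.drop w.length)) else none := by
  induction w with
  | nil => intro s; simp [chain, walk]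
  | cons c w ih =>
    intro s
    cases s with
    | nil => simp [chain, walk]
    | cons d rest =>
      simp only [chain, walk, childGet]
      by_cases hd : c = d
      · subst hd
        simp [ih, List.cons_prefix_cons]
      · have hb : (c == d) = false := beq_eq_false_iff_ne.mpr hd
        simp [hb, List.cons_prefix_cons, hd]

lemma walk_eq_spec3 (s : List Char) : walk theTrie s = spec3 s := by
  have hT : theTrie
      = Trie.node none (.cons 't' (chain "emplate_".toList "Template")
          (.cons 's' (chain "cript_".toList "Script")
            (.cons 'r' (chain "eplay_".toList "Replay") .nil))) := rfl
  have ht : "template_".toList = 't' :: "emplate_".toList := by decide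
  have hs : "script_".toList = 's' :: "cript_".toList := by decide
  have hr : "replay_".toList = 'r' :: "eplay_".toList := by decide
  rw [hT]
  cases s with
  | nil =>
    rw [show spec3 [] = none from by decide]
    simp [walk]
  | cons d rest =>
    simp only [walk, childGet, spec3, ht, hs, hr, List.cons_prefix_cons]
    by_cases h1 : d = 't'
    · subst h1
      simp [walk_chain, show (9 : Nat) = 8 + 1 from rfl, List.drop_succ_cons]
    · have hb1 : ('t' == d) = false := beq_eq_false_iff_ne.mpr (fun h => h1 h.symm)
      by_cases h2 : d = 's'
      · subst h2
        simp [hb1, walk_chain, show (7 : Nat) = 6 + 1 from rfl, List.drop_succ_cons]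
      · have hb2 : ('s' == d) = false := beq_eq_false_iff_ne.mpr (fun h => h2 h.symm)
        by_cases h3 : d = 'r'
        · subst h3
          simp [hb1, hb2, walk_chain, show (7 : Nat) = 6 + 1 from rfl, List.drop_succ_cons]
        · have hb3 : ('r' == d) = false := beq_eq_false_iff_ne.mpr (fun h => h3 h.symm)
          simp only [hb1, hb2, hb3, Bool.false_eq_true, if_false]
          rw [if_neg (fun hc : ('t' = d ∧ "emplate_".toList <+: rest) => h1 hc.1.symm),
            if_neg (fun hc : ('s' = d ∧ "cript_".toList <+: rest) => h2 hc.1.symm),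
            if_neg (fun hc : ('r' = d ∧ "eplay_".toList <+: rest) => h3 hc.1.symm)]

-- ===== VERDICT (by name: the statement is the Claim_ definition above) =====
theorem parse_event_test_py_spec : Claim_equal_parse_event_test_py := by
  intro name _
  unfold Spec_parse_event_test_py parse_event_test_py parse_event_test_py_alt
  rw [loopA_eq_spec3, walk_eq_spec3]
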